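-- pv_equiv track=rewrite | github.com/zzarbttoo/algorithm | programmers/Graph/most_distance_node.py | solution
-- ===== SOURCE A (Python) =====
-- import collections
-- import heapq
--
-- def solution(n, edge):
--
--     dist = collections.defaultdict(int)
--     graph = collections.defaultdict(list)
--
--     Q = [1] #거리는 0, 노드는 1 부터 시작
--     dist[1] = 0
--     for node in edge:
--         graph[min(node)].append(max(node))
--
--
--     while Q:
--         now_node = heapq.heappop(Q) #최소 값 출력
--         for node in graph[now_node]:
--             if dist[node] == 0:
--                 next_distance = dist[now_node] + 1
--                 dist[node] = next_distance
--                 heapq.heappush(Q, node)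
--
--
--     num = collections.defaultdict(int)
--
--     for i in dist:
--         num[dist[i]] +=1
--
--     return num[max(num)]
-- ===== SOURCE B (Python) =====
-- import collections
--
-- def solution(n, edge):
--     # Heap-free re-implementation: every edge goes from min(e) to max(e), so the
--     # heap in A pops nodes in ascending id order; a single ascending sweep over
--     # the sorted set of candidate node ids computes the same distances.
--     graph = collections.defaultdict(list)
--     nodes = {1}
--     for e in edge:
--         graph[min(e)].append(max(e))
--         nodes.add(max(e))
--     dist = {1: 0}
--     for u in sorted(nodes):
--         if u in dist:
--             for v in graph[u]:
--                 if dist.get(v, 0) == 0: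
--                     dist[v] = dist[u] + 1
--     vals = list(dist.values())
--     m = max(vals)
--     return vals.count(m)
-- ===== Notes on version B (the rewrite author's own statement) =====
-- stated objective: alternative
-- what changed: Eliminates the heapq worklist: since every adjacency entry goes min(e)->max(e), A's heap pops nodes in ascending id order, so B replaces the whole pop/push loop by one ascending sweep over the sorted set of candidate node ids, then counts the maximal distance value directly on dist.values() instead of building a second counting dict.
import Mathlib
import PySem

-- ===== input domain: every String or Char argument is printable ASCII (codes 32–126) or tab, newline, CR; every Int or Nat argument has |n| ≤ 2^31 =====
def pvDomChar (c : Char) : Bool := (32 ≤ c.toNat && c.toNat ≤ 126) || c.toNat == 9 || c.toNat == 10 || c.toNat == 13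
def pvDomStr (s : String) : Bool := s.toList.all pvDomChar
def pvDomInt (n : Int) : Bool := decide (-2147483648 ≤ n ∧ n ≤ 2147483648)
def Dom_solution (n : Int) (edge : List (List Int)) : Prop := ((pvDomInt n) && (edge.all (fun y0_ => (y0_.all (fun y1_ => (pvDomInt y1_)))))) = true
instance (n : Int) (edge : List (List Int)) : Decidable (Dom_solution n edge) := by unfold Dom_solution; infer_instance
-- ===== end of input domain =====

-- B replaces A's heapq worklist by one ascending sweep over the sorted set of candidate
-- node ids (valid because every adjacency entry goes min(e)→max(e)); same return value.

-- ===== PORT A =====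
-- min(node) / max(node)
def pvMinA (e : List Int) : Int := (PySem.List.min? e (fun x => x)).getD 0
def pvMaxA (e : List Int) : Int := (PySem.List.max? e (fun x => x)).getD 0

-- for node in edge: graph[min(node)].append(max(node))   (defaultdict(list) append = Dict.modify)
def buildGraphA (edge : List (List Int)) : PySem.Dict Int (List Int) :=
  edge.foldl (fun g e => g.modify (pvMinA e) [] (fun l => l ++ [pvMaxA e])) PySem.Dict.empty

-- body of 'for node in graph[now_node]': state = (Q, dist)
def stepA (m : Int) (st : List Int × PySem.Dict Int Int) (v : Int) : List Int × PySem.Dict Int Int :=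
  if st.2.getD v 0 == 0 then (st.1 ++ [v], st.2.insert v (st.2.getD m 0 + 1)) else st

-- while Q: now_node = heappop(Q) … — heappop on an int heap returns the minimum and removes
-- one occurrence of it (value-exact for heapq on ints); fuel bounds the number of loop
-- iterations (pops ≤ 1 + pushes ≤ 1 + |edge|); sufficiency of this fuel is proved below.
def aLoop (g : PySem.Dict Int (List Int)) : Nat → List Int → PySem.Dict Int Int → PySem.Dict Int Int
  | _, [], dist => dist
  | 0, _ :: _, dist => dist
  | fuel+1, q :: qs, dist =>
    let m := (PySem.List.min? (q :: qs) (fun x => x)).getD 0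
    let Q' := (PySem.List.remove? (q :: qs) m).getD (q :: qs)
    let st := (g.getD m []).foldl (stepA m) (Q', dist)
    aLoop g fuel st.1 st.2

def solution (n : Int) (edge : List (List Int)) : Int :=
  let g := buildGraphA edge
  let dist := aLoop g (edge.length + 1) [1] ((PySem.Dict.empty : PySem.Dict Int Int).insert 1 0)
  let num := dist.keys.foldl (fun d i => d.modify (dist.getD i 0) 0 (fun c => c + 1))
               (PySem.Dict.empty : PySem.Dict Int Int)
  num.getD ((PySem.List.max? num.keys (fun x => x)).getD 0) 0

-- ===== PORT B =====
def pvMinB (e : List Int) : Int := (PySem.List.min? e (fun x => x)).getD 0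
def pvMaxB (e : List Int) : Int := (PySem.List.max? e (fun x => x)).getD 0

-- single loop: graph[min(e)].append(max(e)); nodes.add(max(e))
def buildB (edge : List (List Int)) : PySem.Dict Int (List Int) × List Int :=
  edge.foldl
    (fun acc e => (acc.1.modify (pvMinB e) [] (fun l => l ++ [pvMaxB e]), PySem.Set.add acc.2 (pvMaxB e)))
    (PySem.Dict.empty, PySem.Set.ofList [1])

-- body of 'for v in graph[u]'
def stepB (u : Int) (d : PySem.Dict Int Int) (v : Int) : PySem.Dict Int Int :=
  if d.getD v 0 == 0 then d.insert v (d.getD u 0 + 1) else d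

-- body of 'for u in sorted(nodes)'
def sweepStep (g : PySem.Dict Int (List Int)) (d : PySem.Dict Int Int) (u : Int) : PySem.Dict Int Int :=
  if d.contains u then (g.getD u []).foldl (stepB u) d else d

def solution_alt (n : Int) (edge : List (List Int)) : Int :=
  let gn := buildB edge
  let order := PySem.List.sorted gn.2 (fun x => x) false
  let dist := order.foldl (sweepStep gn.1) ((PySem.Dict.empty : PySem.Dict Int Int).insert 1 0)
  let vals := dist.values
  let m := (PySem.List.max? vals (fun x => x)).getD 0
  ((PySem.List.count vals m : Nat) : Int)

-- ===== PRECONDITION & SPEC =====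
-- Pre_ excludes exactly the inputs where Python A raises: min()/max() of an empty inner
-- list is a ValueError (B raises on the same inputs).
def Pre_solution (n : Int) (edge : List (List Int)) : Prop := ∀ e ∈ edge, e ≠ []
instance (n : Int) (edge : List (List Int)) : Decidable (Pre_solution n edge) := by
  unfold Pre_solution; infer_instance

def pvWitness_solution : Int × List (List Int) := (4, [[1, 2], [2, 3], [1, 1], [2, 4]])

def Spec_solution (n : Int) (edge : List (List Int)) (out : Int) : Prop := out = solution_alt n edge
instance (n : Int) (edge : List (List Int)) (out : Int) : Decidable (Spec_solution n edge out) := by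
  unfold Spec_solution; infer_instance

-- ===== CLAIM (what is proved, stated in full; the proofs are below) =====
def Claim_equal_solution : Prop := ∀ (n : Int) (edge : List (List Int)), Dom_solution n edge → Pre_solution n edge → Spec_solution n edge (solution n edge)

-- ===== LEMMAS AND PROOFS =====

-- the list of nodes A pushes while scanning graph[m] with current dict d
def pushes (m : Int) : List Int → PySem.Dict Int Int → List Int
  | [], _ => []
  | v :: l, d => if d.getD v 0 == 0 then v :: pushes m l (d.insert v (d.getD m 0 + 1)) else pushes m l d

theorem foldA_eq (m : Int) : ∀ (l : List Int) (Q : List Int) (d : PySem.Dict Int Int),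
    l.foldl (stepA m) (Q, d) = (Q ++ pushes m l d, l.foldl (stepB m) d) := by
  intro l
  induction l with
  | nil => intro Q d; simp [pushes]
  | cons v l ih =>
    intro Q d
    by_cases h : (d.getD v 0 == 0) = true
    · simp only [List.foldl_cons, stepA, stepB, pushes, h, if_pos, if_true]
      rw [ih]; simp
    · simp only [List.foldl_cons, stepA, stepB, pushes, h, if_false, Bool.false_eq_true]
      rw [ih]

theorem F_persist (m : Int) : ∀ (l : List Int) (d : PySem.Dict Int Int) (x : Int),
    d.getD x 0 ≠ 0 → (l.foldl (stepB m) d).getD x 0 = d.getD x 0 := by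
  intro l
  induction l with
  | nil => intro d x _; rfl
  | cons v l ih =>
    intro d x hx
    by_cases h : (d.getD v 0 == 0) = true
    · have hvx : x ≠ v := by
        intro he; subst he; exact hx (by simpa using h)
      simp only [List.foldl_cons, stepB, h, if_true]
      rw [ih _ _ (by rwa [PySem.Dict.getD_insert_of_ne _ _ _ hvx]),
          PySem.Dict.getD_insert_of_ne _ _ _ hvx]
    · simp only [List.foldl_cons, stepB, h, if_false, Bool.false_eq_true]
      exact ih _ _ hx

theorem F_contains_mono (m : Int) : ∀ (l : List Int) (d : PySem.Dict Int Int) (x : Int),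
    d.contains x = true → (l.foldl (stepB m) d).contains x = true := by
  intro l
  induction l with
  | nil => intro d x h; exact h
  | cons v l ih =>
    intro d x hx
    by_cases h : (d.getD v 0 == 0) = true
    · simp only [List.foldl_cons, stepB, h, if_true]
      exact ih _ _ (by rw [PySem.Dict.contains_insert]; simp [hx])
    · simp only [List.foldl_cons, stepB, h, if_false, Bool.false_eq_true]
      exact ih _ _ hx

theorem F_contains_iff (m : Int) : ∀ (l : List Int) (d : PySem.Dict Int Int) (x : Int),
    (l.foldl (stepB m) d).contains x = true ↔ d.contains x = true ∨ x ∈ pushes m l d := by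
  intro l
  induction l with
  | nil => intro d x; simp [pushes]
  | cons v l ih =>
    intro d x
    by_cases h : (d.getD v 0 == 0) = true
    · simp only [List.foldl_cons, stepB, pushes, h, if_true]
      rw [ih]
      rw [PySem.Dict.contains_insert]
      constructor
      · rintro (hc | hp)
        · rcases Bool.or_eq_true_iff.mp hc with hc | hc
          · exact Or.inr (by simp [List.mem_cons, (by simpa using hc : x = v)])
          · exact Or.inl hc
        · exact Or.inr (List.mem_cons_of_mem _ hp)
      · rintro (hc | hp)
        · exact Or.inl (by simp [hc])
        · rcases List.mem_cons.mp hp with he | hp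
          · exact Or.inl (by simp [he])
          · exact Or.inr hp
    · simp only [List.foldl_cons, stepB, pushes, h, if_false, Bool.false_eq_true]
      exact ih _ _

theorem pushes_subset (m : Int) : ∀ (l : List Int) (d : PySem.Dict Int Int) (x : Int),
    x ∈ pushes m l d → x ∈ l := by
  intro l
  induction l with
  | nil => intro d x h; simp [pushes] at h
  | cons v l ih =>
    intro d x h
    by_cases hg : (d.getD v 0 == 0) = true
    · simp only [pushes, hg, if_true] at h
      rcases List.mem_cons.mp h with he | hp
      · simp [he]
      · exact List.mem_cons_of_mem _ (ih _ _ hp)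
    · simp only [pushes, hg, if_false, Bool.false_eq_true] at h
      exact List.mem_cons_of_mem _ (ih _ _ h)

theorem F_nonneg (m : Int) : ∀ (l : List Int) (d : PySem.Dict Int Int),
    (∀ k, 0 ≤ d.getD k 0) → ∀ k, 0 ≤ (l.foldl (stepB m) d).getD k 0 := by
  intro l
  induction l with
  | nil => intro d h k; exact h k
  | cons v l ih =>
    intro d hd k
    by_cases h : (d.getD v 0 == 0) = true
    · simp only [List.foldl_cons, stepB, h, if_true]
      refine ih _ (fun k' => ?_) k
      rw [PySem.Dict.getD_insert]
      split
      · have := hd m; omega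
      · exact hd k'
    · simp only [List.foldl_cons, stepB, h, if_false, Bool.false_eq_true]
      exact ih _ hd k

theorem F_saturates (m : Int) : ∀ (l : List Int) (d : PySem.Dict Int Int),
    (∀ k, 0 ≤ d.getD k 0) → ∀ v ∈ l, (l.foldl (stepB m) d).getD v 0 ≠ 0 := by
  intro l
  induction l with
  | nil => intro d _ v hv; simp at hv
  | cons w l ih =>
    intro d hd v hv
    by_cases h : (d.getD w 0 == 0) = true
    · simp only [List.foldl_cons, stepB, h, if_true]
      have hd' : ∀ k, 0 ≤ (d.insert w (d.getD m 0 + 1)).getD k 0 := by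
        intro k'; rw [PySem.Dict.getD_insert]; split
        · have := hd m; omega
        · exact hd k'
      rcases List.mem_cons.mp hv with he | hm
      · subst he
        rw [F_persist m l _ v (by rw [PySem.Dict.getD_insert_self]; have := hd m; omega)]
        rw [PySem.Dict.getD_insert_self]; have := hd m; omega
      · exact ih _ hd' v hm
    · simp only [List.foldl_cons, stepB, h, if_false, Bool.false_eq_true]
      rcases List.mem_cons.mp hv with he | hm
      · subst he
        rw [F_persist m l _ v (by simpa using h)]
        simpa using h
      · exact ih _ hd v hm

theorem F_noop (m : Int) : ∀ (l : List Int) (d : PySem.Dict Int Int),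
    (∀ v ∈ l, d.getD v 0 ≠ 0) → l.foldl (stepB m) d = d ∧ pushes m l d = [] := by
  intro l
  induction l with
  | nil => intro d _; exact ⟨rfl, rfl⟩
  | cons v l ih =>
    intro d hd
    have hv : (d.getD v 0 == 0) = false := by
      simpa using hd v (List.mem_cons_self ..)
    simp only [List.foldl_cons, stepB, pushes, hv, if_false, Bool.false_eq_true]
    exact ih _ (fun w hw => hd w (List.mem_cons_of_mem _ hw))

theorem pushes_length (m : Int) : ∀ (l : List Int) (d : PySem.Dict Int Int),
    (pushes m l d).length ≤ l.length := by
  intro l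
  induction l with
  | nil => intro d; simp [pushes]
  | cons v l ih =>
    intro d
    by_cases h : (d.getD v 0 == 0) = true
    · simp only [pushes, h, if_true, List.length_cons]
      exact Nat.succ_le_succ (ih _)
    · simp only [pushes, h, if_false, Bool.false_eq_true, List.length_cons]
      exact Nat.le_succ_of_le (ih _)

theorem F_nodup_keys (m : Int) : ∀ (l : List Int) (d : PySem.Dict Int Int),
    d.keys.Nodup → (l.foldl (stepB m) d).keys.Nodup := by
  intro l
  induction l with
  | nil => intro d h; exact h
  | cons v l ih =>
    intro d hd
    by_cases h : (d.getD v 0 == 0) = true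
    · simp only [List.foldl_cons, stepB, h, if_true]
      exact ih _ (PySem.Dict.nodup_keys_insert _ _ _ hd)
    · simp only [List.foldl_cons, stepB, h, if_false, Bool.false_eq_true]
      exact ih _ hd

theorem sweep_skip (g : PySem.Dict Int (List Int)) : ∀ (pre : List Int) (d : PySem.Dict Int Int),
    (∀ p ∈ pre, d.contains p = false) → pre.foldl (sweepStep g) d = d := by
  intro pre
  induction pre with
  | nil => intro d _; rfl
  | cons p pre ih =>
    intro d h
    have hp : d.contains p = false := h p (List.mem_cons_self ..)
    simp only [List.foldl_cons, sweepStep, hp, Bool.false_eq_true, if_false]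
    exact ih d (fun q hq => h q (List.mem_cons_of_mem _ hq))

theorem sim (g : PySem.Dict Int (List Int)) (C : List Int)
    (hg : ∀ u v, v ∈ g.getD u [] → u ≤ v ∧ v ∈ C) :
    ∀ (fuel : Nat) (Q : List Int) (dist : PySem.Dict Int Int) (rest : List Int),
      rest.Pairwise (· < ·) →
      (∀ k, 0 ≤ dist.getD k 0) →
      (∀ u ∈ Q, dist.contains u = true) →
      (∀ u ∈ rest, dist.contains u = true → u ∈ Q) →
      (∀ u ∈ Q, u ∈ rest ∨ ∀ v ∈ g.getD u [], dist.getD v 0 ≠ 0) →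
      (∀ c ∈ C, c ∉ rest → ∀ u ∈ Q, c ≤ u) →
      Q.length + (rest.map (fun u => (g.getD u []).length)).sum ≤ fuel →
      aLoop g fuel Q dist = rest.foldl (sweepStep g) dist := by
  intro fuel
  induction fuel with
  | zero =>
    intro Q dist rest h1 h0 h2 h3 h4 h5 h6
    cases Q with
    | nil =>
      rw [show aLoop g 0 [] dist = dist from rfl, sweep_skip]
      intro p hp
      by_contra hc
      have := h3 p hp (by revert hc; cases (dist.contains p) <;> simp)
      simp at this
    | cons q qs => simp at h6
  | succ fuel ih =>
    intro Q dist rest h1 h0 h2 h3 h4 h5 h6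
    cases Q with
    | nil =>
      rw [show aLoop g (fuel+1) [] dist = dist from rfl, sweep_skip]
      intro p hp
      by_contra hc
      have := h3 p hp (by revert hc; cases (dist.contains p) <;> simp)
      simp at this
    | cons q qs =>
      -- the popped minimum m
      obtain ⟨m, hmin⟩ : ∃ m, PySem.List.min? (q :: qs) (fun x => x) = some m := by
        cases hm : PySem.List.min? (q :: qs) (fun x => x) with
        | none => simp [PySem.List.min?_eq_none_iff] at hm
        | some m => exact ⟨m, rfl⟩
      have hmQ : m ∈ q :: qs := PySem.List.min?_mem hmin
      have hmle : ∀ u ∈ q :: qs, m ≤ u := fun u hu => PySem.List.min?_isMin hmin u hu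
      have hrm : PySem.List.remove? (q :: qs) m = some ((q :: qs).erase m) :=
        PySem.List.remove?_eq_some_erase _ m hmQ
      have hunf : aLoop g (fuel+1) (q :: qs) dist =
          aLoop g fuel ((q :: qs).erase m ++ pushes m (g.getD m []) dist)
            ((g.getD m []).foldl (stepB m) dist) := by
        show aLoop g fuel _ _ = _
        rw [hmin]
        simp only [Option.getD_some, hrm, foldA_eq]
      set lg := g.getD m [] with hlg
      set P := pushes m lg dist with hP
      set d2 := lg.foldl (stepB m) dist with hd2
      have hQlen : ((q :: qs).erase m).length = (q :: qs).length - 1 :=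
        List.length_erase_of_mem hmQ
      by_cases hmrest : m ∈ rest
      · -- A processes m; B's sweep reaches m after skipping non-reached smaller ids
        obtain ⟨pre, post, hsplit⟩ := List.append_of_mem hmrest
        subst hsplit
        have hpw := h1
        rw [List.pairwise_append] at hpw
        obtain ⟨hpre_pw, hmpost_pw, hcross⟩ := hpw
        have hmlt : ∀ x ∈ post, m < x := (List.pairwise_cons.mp hmpost_pw).1
        have hpost_pw : post.Pairwise (· < ·) := (List.pairwise_cons.mp hmpost_pw).2
        have hprelt : ∀ p ∈ pre, p < m := fun p hp => hcross p hp m (List.mem_cons_self ..)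
        -- pre elements are unreached
        have hpre_nc : ∀ p ∈ pre, dist.contains p = false := by
          intro p hp
          by_contra hc
          have hcT : dist.contains p = true := by revert hc; cases (dist.contains p) <;> simp
          have hpQ := h3 p (by simp [hp]) hcT
          have := hmle p hpQ
          have := hprelt p hp
          omega
        -- B side: fold over pre ++ m :: post
        rw [List.foldl_append, sweep_skip g pre dist hpre_nc, List.foldl_cons]
        have hcm : dist.contains m = true := h2 m hmQ
        rw [show sweepStep g dist m = d2 by simp only [sweepStep, hcm, if_true, hd2, hlg]]
        rw [hunf]
        -- now apply ih
        have hple : P.length ≤ lg.length := by rw [hP]; exact pushes_length m lg dist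
        have hPl : ∀ x ∈ P, x ∈ lg := fun x hx => pushes_subset m lg dist x hx
        have hsum : ((pre ++ m :: post).map (fun u => (g.getD u []).length)).sum
            = (pre.map (fun u => (g.getD u []).length)).sum + lg.length
              + (post.map (fun u => (g.getD u []).length)).sum := by
          simp [List.map_append, List.sum_append, hlg]
          omega
        apply ih
        · exact hpost_pw
        · exact F_nonneg m lg dist h0
        · -- h2'
          intro u hu
          rcases List.mem_append.mp hu with hu | hu
          · exact F_contains_mono m lg dist u (h2 u (List.mem_of_mem_erase hu))
          · exact (F_contains_iff m lg dist u).mpr (Or.inr hu)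
        · -- h3'
          intro u hu hcu
          rcases (F_contains_iff m lg dist u).mp hcu with hcu | hcu
          · have huQ := h3 u (by simp [hu]) hcu
            have hune : u ≠ m := by
              have := hmlt u hu; omega
            exact List.mem_append.mpr (Or.inl ((List.mem_erase_of_ne hune).mpr huQ))
          · exact List.mem_append.mpr (Or.inr hcu)
        · -- h4'
          intro u hu
          rcases List.mem_append.mp hu with hu | hu
          · -- old queue element
            have huQ := List.mem_of_mem_erase hu
            rcases h4 u huQ with hur | hsat
            · rcases List.mem_append.mp hur with hupre | humpost
              · -- impossible: pre elements unreached but u ∈ Q is reached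
                have := hpre_nc u hupre
                have := h2 u huQ
                simp_all
              · rcases List.mem_cons.mp humpost with hue | hupost
                · exact Or.inr (fun v hv => by rw [hue] at hv; exact F_saturates m lg dist h0 v hv)
                · exact Or.inl hupost
            · exact Or.inr (fun v hv => by
                rw [F_persist m lg dist v (hsat v hv)]; exact hsat v hv)
          · -- pushed element
            have hvlg := hPl u hu
            obtain ⟨hmu, huC⟩ := hg m u hvlg
            by_cases hum : u = m
            · exact Or.inr (fun v hv => by rw [hum] at hv; exact F_saturates m lg dist h0 v hv)
            · have hmult : m < u := lt_of_le_of_ne hmu (fun h => hum h.symm)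
              have hurest : u ∈ pre ++ m :: post := by
                by_contra hnr
                have := h5 u huC hnr m hmQ
                omega
              rcases List.mem_append.mp hurest with hupre | humpost
              · have := hprelt u hupre; omega
              · rcases List.mem_cons.mp humpost with hue | hupost
                · omega
                · exact Or.inl hupost
        · -- h5'
          intro c hcC hcpost u hu
          have hcu2 : ∀ x ∈ (q :: qs).erase m ++ P, m ≤ x → c ≤ m → c ≤ x := by
            intro x _ h1x h2x; omega
          have humge : ∀ x ∈ (q :: qs).erase m ++ P, m ≤ x := by
            intro x hx
            rcases List.mem_append.mp hx with hx | hx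
            · exact hmle x (List.mem_of_mem_erase hx)
            · exact (hg m x (hPl x hx)).1
          by_cases hcrest : c ∈ pre ++ m :: post
          · -- c is pre or m itself
            have hcm : c ≤ m := by
              rcases List.mem_append.mp hcrest with hc | hc
              · have := hprelt c hc; omega
              · rcases List.mem_cons.mp hc with hc | hc
                · omega
                · exact absurd hc hcpost
            exact hcu2 u hu (humge u hu) hcm
          · have hcall := h5 c hcC hcrest
            have : c ≤ m := hcall m hmQ
            exact hcu2 u hu (humge u hu) this
        · -- fuel
          rw [hsum] at h6
          have h7 : ((q :: qs).erase m ++ P).length ≤ (q :: qs).length - 1 + lg.length := by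
            rw [List.length_append, hQlen]
            omega
          have hq1 : 1 ≤ (q :: qs).length := by simp
          omega
      · -- m not in rest: its adjacency is saturated, the pop is a no-op
        have hsat : ∀ v ∈ lg, dist.getD v 0 ≠ 0 := by
          rcases h4 m hmQ with h | h
          · exact absurd h hmrest
          · exact h
        obtain ⟨hF, hPnil⟩ := F_noop m lg dist hsat
        have hqp : (q :: qs).erase m ++ P = (q :: qs).erase m := by
          rw [hP, hPnil, List.append_nil]
        rw [hunf, hqp, hd2, hF]
        apply ih
        · exact h1
        · exact h0
        · exact fun u hu => h2 u (List.mem_of_mem_erase hu)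
        · intro u hu hcu
          have huQ := h3 u hu hcu
          have hune : u ≠ m := fun he => hmrest (he ▸ hu)
          exact (List.mem_erase_of_ne hune).mpr huQ
        · exact fun u hu => h4 u (List.mem_of_mem_erase hu)
        · exact fun c hcC hcr u hu => h5 c hcC hcr u (List.mem_of_mem_erase hu)
        · rw [hQlen]
          have hq1 : 1 ≤ (q :: qs).length := by simp
          omega

theorem graph_getD (edge : List (List Int)) (u : Int) :
    (buildGraphA edge).getD u [] =
      ((edge.map (fun e => (pvMinA e, pvMaxA e))).filter (fun p => p.1 == u)).map (fun p => p.2) := by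
  have h := PySem.Dict.getD_foldl_modify_append (edge.map (fun e => (pvMinA e, pvMaxA e)))
    (PySem.Dict.empty) u
  rw [List.foldl_map] at h
  simpa [buildGraphA] using h

theorem mem_graph (edge : List (List Int)) (u v : Int) :
    v ∈ (buildGraphA edge).getD u [] ↔ ∃ e ∈ edge, pvMinA e = u ∧ pvMaxA e = v := by
  rw [graph_getD]
  constructor
  · intro h
    obtain ⟨p, hp, hpv⟩ := List.mem_map.mp h
    obtain ⟨hpm, hpu⟩ := List.mem_filter.mp hp
    obtain ⟨e, he, hpe⟩ := List.mem_map.mp hpm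
    refine ⟨e, he, ?_, ?_⟩
    · have : p.1 = u := by simpa using hpu
      rw [← this, ← hpe]
    · rw [← hpv, ← hpe]
  · rintro ⟨e, he, hu, hv⟩
    refine List.mem_map.mpr ⟨(pvMinA e, pvMaxA e), List.mem_filter.mpr ⟨List.mem_map.mpr ⟨e, he, rfl⟩, by simpa using hu⟩, hv⟩

theorem pvMin_le_pvMax (e : List Int) : pvMinA e ≤ pvMaxA e := by
  cases e with
  | nil => exact le_refl 0
  | cons x t =>
    obtain ⟨a, ha⟩ : ∃ a, PySem.List.min? (x :: t) (fun y => y) = some a := by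
      cases h : PySem.List.min? (x :: t) (fun y => y) with
      | none => simp [PySem.List.min?_eq_none_iff] at h
      | some a => exact ⟨a, rfl⟩
    obtain ⟨b, hb⟩ : ∃ b, PySem.List.max? (x :: t) (fun y => y) = some b := by
      cases h : PySem.List.max? (x :: t) (fun y => y) with
      | none => simp [PySem.List.max?_eq_none_iff] at h
      | some b => exact ⟨b, rfl⟩
    rw [pvMinA, pvMaxA, ha, hb]
    simpa using PySem.List.min?_isMin ha b (PySem.List.max?_mem hb)

theorem buildB_eq (edge : List (List Int)) :
    buildB edge = (buildGraphA edge, PySem.Set.ofList (1 :: edge.map pvMaxA)) := by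
  have h := PySem.List.foldl_prod_mk
    (fun (d : PySem.Dict Int (List Int)) (e : List Int) => d.modify (pvMinB e) [] fun l => l ++ [pvMaxB e])
    (fun (s : List Int) (e : List Int) => PySem.Set.add s (pvMaxB e))
    edge PySem.Dict.empty (PySem.Set.ofList [1])
  have h2 : buildB edge =
      (List.foldl (fun d e => PySem.Dict.modify d (pvMinB e) [] fun l => l ++ [pvMaxB e]) PySem.Dict.empty edge,
       List.foldl (fun s e => PySem.Set.add s (pvMaxB e)) (PySem.Set.ofList [1]) edge) := h
  rw [h2]
  refine Prod.ext ?_ ?_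
  · rfl
  · show List.foldl (fun s e => PySem.Set.add s (pvMaxB e)) (PySem.Set.ofList [1]) edge = _
    rw [← PySem.Set.update_map_eq_foldl_add edge pvMaxB (PySem.Set.ofList [1]),
        ← PySem.Set.ofList_append]
    rfl

theorem sum_indicator_le_one (C : List Int) (a : Int) (h : C.Nodup) :
    (C.map (fun u => if a == u then (1:Nat) else 0)).sum ≤ 1 := by
  induction C with
  | nil => simp
  | cons c C ih =>
    obtain ⟨hcC, hnd⟩ := List.nodup_cons.mp h
    by_cases hac : (a == c) = true
    · have ha : a = c := by simpa using hac
      have hz : (C.map (fun u => if a == u then (1:Nat) else 0)).sum = 0 := by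
        apply List.sum_eq_zero
        intro x hx
        obtain ⟨u, hu, hux⟩ := List.mem_map.mp hx
        have hne : a ≠ u := by
          intro he
          apply hcC
          rw [ha] at he
          rw [he]
          exact hu
        rw [← hux]
        simp [hne]
      rw [List.map_cons, List.sum_cons, hz]
      simp [hac]
    · simp only [List.map_cons, List.sum_cons, hac, Bool.false_eq_true, if_false, Nat.zero_add]
      exact ih hnd

theorem filter_budget : ∀ (l : List (Int × Int)) (C : List Int), C.Nodup →
    (C.map (fun u => (l.filter (fun p => p.1 == u)).length)).sum ≤ l.length := by
  intro l
  induction l with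
  | nil => intro C _; simp
  | cons x l ih =>
    intro C hC
    have hcong : ∀ u ∈ C, ((x :: l).filter (fun p => p.1 == u)).length
        = (if x.1 == u then 1 else 0) + (l.filter (fun p => p.1 == u)).length := by
      intro u _
      rw [List.filter_cons]
      split <;> simp [Nat.add_comm]
    rw [List.map_congr_left hcong, List.sum_map_add]
    have h1 := sum_indicator_le_one C x.1 hC
    have h2 := ih C hC
    simp only [List.length_cons]
    omega

theorem sweep_nodup (g : PySem.Dict Int (List Int)) : ∀ (l : List Int) (d : PySem.Dict Int Int),
    d.keys.Nodup → (l.foldl (sweepStep g) d).keys.Nodup := by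
  intro l
  induction l with
  | nil => intro d h; exact h
  | cons u l ih =>
    intro d hd
    by_cases h : (d.contains u) = true
    · simp only [List.foldl_cons, sweepStep, h, if_true]
      exact ih _ (F_nodup_keys u _ d hd)
    · simp only [List.foldl_cons, sweepStep, h, Bool.false_eq_true, if_false]
      exact ih _ hd

theorem sweep_contains1 (g : PySem.Dict Int (List Int)) : ∀ (l : List Int) (d : PySem.Dict Int Int),
    d.contains 1 = true → (l.foldl (sweepStep g) d).contains 1 = true := by
  intro l
  induction l with
  | nil => intro d h; exact h
  | cons u l ih =>
    intro d hd
    by_cases h : (d.contains u) = true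
    · simp only [List.foldl_cons, sweepStep, h, if_true]
      exact ih _ (F_contains_mono u _ d 1 hd)
    · simp only [List.foldl_cons, sweepStep, h, Bool.false_eq_true, if_false]
      exact ih _ hd

theorem final_eq (D : PySem.Dict Int Int) (hnd : D.keys.Nodup) (hc1 : D.contains 1 = true) :
    (D.keys.foldl (fun d i => d.modify (D.getD i 0) 0 (fun c => c + 1)) (PySem.Dict.empty : PySem.Dict Int Int)).getD
      ((PySem.List.max? (D.keys.foldl (fun d i => d.modify (D.getD i 0) 0 (fun c => c + 1)) (PySem.Dict.empty : PySem.Dict Int Int)).keys (fun x => x)).getD 0) 0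
    = ((PySem.List.count D.values ((PySem.List.max? D.values (fun x => x)).getD 0) : Nat) : Int) := by
  have hvals : D.values = D.keys.map (fun k => D.getD k 0) := PySem.Dict.values_eq_map_keys D hnd 0
  have hnum : D.keys.foldl (fun d i => d.modify (D.getD i 0) 0 (fun c => c + 1)) (PySem.Dict.empty : PySem.Dict Int Int)
      = PySem.Dict.counter D.values := by
    rw [PySem.Dict.counter_eq_foldl, hvals, List.foldl_map]
  rw [hnum, PySem.Dict.keys_counter]
  have h1k : 1 ∈ D.keys := (PySem.Dict.contains_iff_mem_keys D 1).mp hc1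
  have hkne : D.keys ≠ [] := List.ne_nil_of_mem h1k
  have hvne : D.values ≠ [] := by
    rw [hvals]
    simpa [List.map_eq_nil_iff] using hkne
  obtain ⟨M, hM⟩ : ∃ M, PySem.List.max? D.values (fun x => x) = some M := by
    cases h : PySem.List.max? D.values (fun x => x) with
    | none => exact absurd ((PySem.List.max?_eq_none_iff _ _).mp h) hvne
    | some M => exact ⟨M, rfl⟩
  have hMmem := PySem.List.max?_mem hM
  obtain ⟨M', hM'⟩ : ∃ M', PySem.List.max? (PySem.Set.ofList D.values) (fun x => x) = some M' := by
    cases h : PySem.List.max? (PySem.Set.ofList D.values) (fun x => x) with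
    | none =>
      exact absurd ((PySem.List.max?_eq_none_iff _ _).mp h)
        (List.ne_nil_of_mem ((PySem.Set.mem_ofList _ _).mpr hMmem))
    | some M' => exact ⟨M', rfl⟩
  have hMM' : M' = M := by
    have h1 : M' ∈ D.values := (PySem.Set.mem_ofList _ _).mp (PySem.List.max?_mem hM')
    have hle1 : M' ≤ M := PySem.List.max?_isMax hM M' h1
    have hle2 : M ≤ M' := PySem.List.max?_isMax hM' M ((PySem.Set.mem_ofList _ _).mpr hMmem)
    omega
  rw [hM, hM', Option.getD_some, Option.getD_some, hMM', PySem.Dict.getD_counter,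
      PySem.List.count_eq]

theorem solution_eq_alt (n : Int) (edge : List (List Int)) : solution n edge = solution_alt n edge := by
  have hpw : (PySem.List.sorted (PySem.Set.ofList (1 :: edge.map pvMaxA)) (fun x => x) false).Pairwise (· < ·) :=
    PySem.List.sorted_ofList_pairwise_lt _
  have hmemo : ∀ x, x ∈ PySem.List.sorted (PySem.Set.ofList (1 :: edge.map pvMaxA)) (fun x => x) false
      ↔ x = 1 ∨ x ∈ edge.map pvMaxA := by
    intro x
    rw [PySem.List.mem_sorted, PySem.Set.mem_ofList, List.mem_cons]
  have hg : ∀ u v, v ∈ (buildGraphA edge).getD u [] → u ≤ v ∧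
      v ∈ PySem.List.sorted (PySem.Set.ofList (1 :: edge.map pvMaxA)) (fun x => x) false := by
    intro u v hv
    obtain ⟨e, he, hu, hvmax⟩ := (mem_graph edge u v).mp hv
    constructor
    · rw [← hu, ← hvmax]; exact pvMin_le_pvMax e
    · exact (hmemo v).mpr (Or.inr (hvmax ▸ List.mem_map_of_mem he))
  have hbudget : ((PySem.List.sorted (PySem.Set.ofList (1 :: edge.map pvMaxA)) (fun x => x) false).map
      (fun u => ((buildGraphA edge).getD u []).length)).sum ≤ edge.length := by
    have hperm : (PySem.List.sorted (PySem.Set.ofList (1 :: edge.map pvMaxA)) (fun x => x) false).Perm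
        (PySem.Set.ofList (1 :: edge.map pvMaxA)) := PySem.List.sorted_perm _ _ _
    rw [(hperm.map (fun u => ((buildGraphA edge).getD u []).length)).sum_eq]
    have hf : ∀ u, ((buildGraphA edge).getD u []).length
        = ((edge.map (fun e => (pvMinA e, pvMaxA e))).filter (fun p => p.1 == u)).length := by
      intro u
      rw [graph_getD, List.length_map]
    calc ((PySem.Set.ofList (1 :: edge.map pvMaxA)).map (fun u => ((buildGraphA edge).getD u []).length)).sum
        = ((PySem.Set.ofList (1 :: edge.map pvMaxA)).map
            (fun u => ((edge.map (fun e => (pvMinA e, pvMaxA e))).filter (fun p => p.1 == u)).length)).sum := by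
          rw [List.map_congr_left (fun u _ => hf u)]
      _ ≤ (edge.map (fun e => (pvMinA e, pvMaxA e))).length :=
          filter_budget _ _ (PySem.Set.nodup_ofList _)
      _ = edge.length := List.length_map ..
  have hc0 : ((PySem.Dict.empty : PySem.Dict Int Int).insert 1 0).contains 1 = true := by
    rw [PySem.Dict.contains_insert]; simp
  have hsim : aLoop (buildGraphA edge) (edge.length + 1) [1] ((PySem.Dict.empty : PySem.Dict Int Int).insert 1 0)
      = (PySem.List.sorted (PySem.Set.ofList (1 :: edge.map pvMaxA)) (fun x => x) false).foldl
          (sweepStep (buildGraphA edge)) ((PySem.Dict.empty : PySem.Dict Int Int).insert 1 0) := by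
    apply sim (buildGraphA edge) _ hg
    · exact hpw
    · intro k
      rw [PySem.Dict.getD_insert]
      split
      · omega
      · rw [PySem.Dict.getD_empty]
    · intro u hu
      rw [List.mem_singleton] at hu
      rw [hu]; exact hc0
    · intro u _ hc
      rw [PySem.Dict.contains_insert, PySem.Dict.contains_empty] at hc
      have : u = 1 := by simpa using hc
      simp [this]
    · intro u hu
      rw [List.mem_singleton] at hu
      exact Or.inl ((hmemo u).mpr (Or.inl hu))
    · exact fun c hc hnc => absurd hc hnc
    · have := hbudget
      simp only [List.length_singleton]
      omega
  have hnd : ((PySem.List.sorted (PySem.Set.ofList (1 :: edge.map pvMaxA)) (fun x => x) false).foldl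
      (sweepStep (buildGraphA edge)) ((PySem.Dict.empty : PySem.Dict Int Int).insert 1 0)).keys.Nodup :=
    sweep_nodup _ _ _ (PySem.Dict.nodup_keys_insert _ _ _ PySem.Dict.nodup_keys_empty)
  have hc1 : ((PySem.List.sorted (PySem.Set.ofList (1 :: edge.map pvMaxA)) (fun x => x) false).foldl
      (sweepStep (buildGraphA edge)) ((PySem.Dict.empty : PySem.Dict Int Int).insert 1 0)).contains 1 = true :=
    sweep_contains1 _ _ _ hc0
  simp only [solution, solution_alt, buildB_eq edge]
  rw [hsim]
  exact final_eq _ hnd hc1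

-- ===== VERDICT (by name: the statement is the Claim_ definition above) =====
theorem solution_spec : Claim_equal_solution := by
  intro n edge _ _
  exact solution_eq_alt n edge
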